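-- pv_equiv track=rewrite | github.com/hoolahola/Codejam | 2018/QR/C/C.py | calcTargetCell
-- ===== SOURCE A (Python) =====
-- def calcTargetCell(bottomLeft, topRight, cells):
--     targetR, targetC = bottomLeft
--     maxCell = -1
--
--     for r in range(bottomLeft[0] + 1, topRight[0], 1):
--         for c in range(bottomLeft[1] + 1, topRight[1], 1):
--             cellCnt = 9
--             for i in [-1, 0, 1]:
--                 for j in [-1, 0, 1]:
--                     if cells[r + i][c + j] == 1:
--                         cellCnt -= 1
--             if cellCnt > maxCell:
--                 maxCell = cellCnt
--                 targetR = r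
--                 targetC = c
--
--     return targetR, targetC
-- ===== SOURCE B (Python) =====
-- def calcTargetCell(bottomLeft, topRight, cells):
--     r0, c0 = bottomLeft
--     r1, c1 = topRight
--     if r1 <= r0 + 1 or c1 <= c0 + 1:
--         return r0, c0
--     H = r1 - r0 + 1  # rows r0..r1 are touched
--     W = c1 - c0 + 1  # cols c0..c1 are touched
--     # summed-area table: P[a][b] = number of ones in cells[r0..r0+a-1][c0..c0+b-1]
--     prev = [0] * (W + 1)
--     P = [prev]
--     for a in range(H):
--         row = cells[r0 + a]
--         cur = [0]
--         s = 0
--         for b in range(W):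
--             if row[c0 + b] == 1:
--                 s += 1
--             cur.append(prev[b + 1] + s)
--         P.append(cur)
--         prev = cur
--     best = -1
--     tR, tC = r0, c0
--     for r in range(r0 + 1, r1):
--         a = r - r0
--         for c in range(c0 + 1, c1):
--             b = c - c0
--             ones = P[a + 2][b + 2] - P[a - 1][b + 2] - P[a + 2][b - 1] + P[a - 1][b - 1]
--             cnt = 9 - ones
--             if cnt > best:
--                 best, tR, tC = cnt, r, c
--     return tR, tC
-- ===== Notes on version B (the rewrite author's own statement) =====
-- stated objective: alternative
-- what changed: B builds a 2D summed-area (prefix-sum) table over the touched rectangle once and scores each interior cell with four table lookups, instead of A's nine nested-loop grid reads per interior cell; the row-major strict-'>' max scan is kept.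
import Mathlib
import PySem

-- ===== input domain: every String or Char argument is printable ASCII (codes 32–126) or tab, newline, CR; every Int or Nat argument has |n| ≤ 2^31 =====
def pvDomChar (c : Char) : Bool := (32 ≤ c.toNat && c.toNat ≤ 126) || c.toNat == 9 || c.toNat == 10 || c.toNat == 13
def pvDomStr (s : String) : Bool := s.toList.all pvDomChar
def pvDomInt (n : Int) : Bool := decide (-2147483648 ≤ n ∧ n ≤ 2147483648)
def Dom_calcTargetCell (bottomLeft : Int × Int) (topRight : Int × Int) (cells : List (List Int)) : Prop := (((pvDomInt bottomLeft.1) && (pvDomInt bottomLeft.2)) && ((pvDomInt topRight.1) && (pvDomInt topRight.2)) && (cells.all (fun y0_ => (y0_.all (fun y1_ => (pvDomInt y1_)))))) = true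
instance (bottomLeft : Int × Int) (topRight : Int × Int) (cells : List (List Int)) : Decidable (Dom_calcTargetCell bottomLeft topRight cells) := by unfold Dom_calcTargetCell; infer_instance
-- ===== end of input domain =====

-- B replaces A's 9-read inner loop per interior cell by a summed-area (2D prefix-sum) table
-- with four lookups per cell (objective: alternative algorithm; same row-major strict-'>' scan).

-- ===== PORT A =====
def calcTargetCell (bottomLeft : Int × Int) (topRight : Int × Int) (cells : List (List Int)) : Int × Int :=
  let res := (PySem.List.pyRange (bottomLeft.1 + 1) topRight.1 1).foldl (fun (st : Int × Int × Int) r =>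
    (PySem.List.pyRange (bottomLeft.2 + 1) topRight.2 1).foldl (fun (st : Int × Int × Int) c =>
      let cellCnt := ([(-1 : Int), 0, 1]).foldl (fun cnt i =>
        ([(-1 : Int), 0, 1]).foldl (fun cnt j =>
          if PySem.List.pyGetD (PySem.List.pyGetD cells (r + i) []) (c + j) 0 = 1 then cnt - 1 else cnt) cnt) 9
      if cellCnt > st.1 then (cellCnt, r, c) else st) st) (-1, bottomLeft.1, bottomLeft.2)
  (res.2.1, res.2.2)

-- ===== PORT B =====
def calcTargetCell_alt (bottomLeft : Int × Int) (topRight : Int × Int) (cells : List (List Int)) : Int × Int :=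
  let r0 := bottomLeft.1; let c0 := bottomLeft.2
  let r1 := topRight.1;   let c1 := topRight.2
  if r1 ≤ r0 + 1 ∨ c1 ≤ c0 + 1 then (r0, c0)
  else
    let H := r1 - r0 + 1
    let W := c1 - c0 + 1
    let prev0 : List Int := PySem.List.pyRepeat [(0 : Int)] (W + 1)
    let build := (PySem.List.pyRange 0 H 1).foldl (fun (st : List (List Int) × List Int) a =>
      let row := PySem.List.pyGetD cells (r0 + a) []
      let cs := (PySem.List.pyRange 0 W 1).foldl (fun (cs : List Int × Int) b =>
        let s := if PySem.List.pyGetD row (c0 + b) 0 = 1 then cs.2 + 1 else cs.2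
        (cs.1 ++ [PySem.List.pyGetD st.2 (b + 1) 0 + s], s)) ([0], 0)
      (st.1 ++ [cs.1], cs.1)) ([prev0], prev0)
    let P := build.1
    let res := (PySem.List.pyRange (r0 + 1) r1 1).foldl (fun (st : Int × Int × Int) r =>
      let a := r - r0
      (PySem.List.pyRange (c0 + 1) c1 1).foldl (fun (st : Int × Int × Int) c =>
        let b := c - c0
        let ones := PySem.List.pyGetD (PySem.List.pyGetD P (a + 2) []) (b + 2) 0
                  - PySem.List.pyGetD (PySem.List.pyGetD P (a - 1) []) (b + 2) 0
                  - PySem.List.pyGetD (PySem.List.pyGetD P (a + 2) []) (b - 1) 0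
                  + PySem.List.pyGetD (PySem.List.pyGetD P (a - 1) []) (b - 1) 0
        let cnt := 9 - ones
        if cnt > st.1 then (cnt, r, c) else st) st) (-1, r0, c0)
    (res.2.1, res.2.2)

-- ===== PRECONDITION & SPEC =====
-- Pre_ excludes exactly the inputs on which Python A raises an IndexError: when BOTH loop
-- ranges are nonempty A reads cells[x][y] for every x in r0..r1 and y in c0..c1 (negative
-- indices wrap, Python-style), so all those indices must be in wrap range; when either loop
-- range is empty A touches the grid nowhere, returns bottomLeft, and Pre_ imposes nothing.
def Pre_calcTargetCell (bottomLeft : Int × Int) (topRight : Int × Int) (cells : List (List Int)) : Prop :=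
  bottomLeft.1 + 1 < topRight.1 ∧ bottomLeft.2 + 1 < topRight.2 →
    PySem.Raise.InRange cells.length bottomLeft.1 ∧ PySem.Raise.InRange cells.length topRight.1 ∧
    ∀ r ∈ PySem.List.pyRange bottomLeft.1 (topRight.1 + 1) 1,
      PySem.Raise.InRange (PySem.List.pyGetD cells r ([] : List Int)).length bottomLeft.2 ∧
      PySem.Raise.InRange (PySem.List.pyGetD cells r ([] : List Int)).length topRight.2
instance (bottomLeft : Int × Int) (topRight : Int × Int) (cells : List (List Int)) : Decidable (Pre_calcTargetCell bottomLeft topRight cells) := by unfold Pre_calcTargetCell; infer_instance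

def pvWitness_calcTargetCell : (Int × Int) × (Int × Int) × List (List Int) :=
  ((0, 0), (3, 3), [[1, 0, 1, 0], [0, 0, 0, 1], [1, 0, 0, 0], [0, 1, 1, 0]])

def Spec_calcTargetCell (bottomLeft : Int × Int) (topRight : Int × Int) (cells : List (List Int)) (out : Int × Int) : Prop := out = calcTargetCell_alt bottomLeft topRight cells
instance (bottomLeft : Int × Int) (topRight : Int × Int) (cells : List (List Int)) (out : Int × Int) : Decidable (Spec_calcTargetCell bottomLeft topRight cells out) := by unfold Spec_calcTargetCell; infer_instance

-- ===== CLAIM (what is proved, stated in full; the proofs are below) =====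
def Claim_equal_calcTargetCell : Prop := ∀ (bottomLeft : Int × Int) (topRight : Int × Int) (cells : List (List Int)), Dom_calcTargetCell bottomLeft topRight cells → Pre_calcTargetCell bottomLeft topRight cells → Spec_calcTargetCell bottomLeft topRight cells (calcTargetCell bottomLeft topRight cells)

-- ===== LEMMAS AND PROOFS =====

-- 0/1 indicator of cells[x][c0+y] == 1 (total, default-valued like the ports' pyGetD reads)
def pvInd (row : List Int) (c0 : Int) (y : Nat) : Int :=
  if PySem.List.pyGetD row (c0 + (y : Int)) 0 = 1 then 1 else 0

-- ones in row among columns c0..c0+b-1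
def pvRowIn (row : List Int) (c0 : Int) (b : Nat) : Int :=
  ((List.range b).map (pvInd row c0)).sum

-- ones in the rectangle rows r0..r0+a-1, cols c0..c0+b-1
def pvSAT (cells : List (List Int)) (r0 c0 : Int) (a b : Nat) : Int :=
  ((List.range a).map (fun x => pvRowIn (PySem.List.pyGetD cells (r0 + (x : Int)) []) c0 b)).sum

lemma pvRowIn_succ (row : List Int) (c0 : Int) (b : Nat) :
    pvRowIn row c0 (b + 1) = pvRowIn row c0 b + pvInd row c0 b := by
  simp [pvRowIn, List.range_succ]

lemma pvSAT_succ (cells : List (List Int)) (r0 c0 : Int) (a b : Nat) :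
    pvSAT cells r0 c0 (a + 1) b
      = pvSAT cells r0 c0 a b + pvRowIn (PySem.List.pyGetD cells (r0 + (a : Int)) []) c0 b := by
  simp [pvSAT, List.range_succ]

lemma pvSAT_zero_right (cells : List (List Int)) (r0 c0 : Int) (a : Nat) :
    pvSAT cells r0 c0 a 0 = 0 := by
  simp [pvSAT, pvRowIn]

lemma pv_ite_sub_one (P : Prop) [Decidable P] (x : Int) :
    (if P then x - 1 else x) = x - (if P then (1 : Int) else 0) := by split <;> ring

lemma pv_ite_add_one (P : Prop) [Decidable P] (x : Int) :
    (if P then x + 1 else x) = x + (if P then (1 : Int) else 0) := by split <;> ring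

lemma pv_foldl_id {α β : Type} (l : List α) (init : β) :
    l.foldl (fun st _ => st) init = init := by
  induction l generalizing init <;> simp_all

-- the 3x3 window as a difference of four prefix rectangles
lemma pvWindow (cells : List (List Int)) (r0 c0 : Int) (m n : Nat) :
    pvSAT cells r0 c0 (m + 3) (n + 3) - pvSAT cells r0 c0 m (n + 3)
      - pvSAT cells r0 c0 (m + 3) n + pvSAT cells r0 c0 m n
    = (pvInd (PySem.List.pyGetD cells (r0 + (m : Int)) []) c0 n
        + pvInd (PySem.List.pyGetD cells (r0 + (m : Int)) []) c0 (n + 1)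
        + pvInd (PySem.List.pyGetD cells (r0 + (m : Int)) []) c0 (n + 2))
      + (pvInd (PySem.List.pyGetD cells (r0 + ((m : Int) + 1)) []) c0 n
        + pvInd (PySem.List.pyGetD cells (r0 + ((m : Int) + 1)) []) c0 (n + 1)
        + pvInd (PySem.List.pyGetD cells (r0 + ((m : Int) + 1)) []) c0 (n + 2))
      + (pvInd (PySem.List.pyGetD cells (r0 + ((m : Int) + 2)) []) c0 n
        + pvInd (PySem.List.pyGetD cells (r0 + ((m : Int) + 2)) []) c0 (n + 1)
        + pvInd (PySem.List.pyGetD cells (r0 + ((m : Int) + 2)) []) c0 (n + 2)) := by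
  have h1 : m + 3 = (m + 2) + 1 := rfl
  have h2 : n + 3 = (n + 2) + 1 := rfl
  rw [h1, h2]
  simp only [pvSAT_succ, pvRowIn_succ]
  push_cast
  ring

-- the inner (per-row) scan of B's table builder
lemma pvInnerScan (row prev : List Int) (c0 : Int) (n : Nat) :
    (List.range n).foldl (fun (cs : List Int × Int) (k : Nat) =>
        (cs.1 ++ [PySem.List.pyGetD prev ((k : Int) + 1) 0 +
            (if PySem.List.pyGetD row (c0 + (k : Int)) 0 = 1 then cs.2 + 1 else cs.2)],
          if PySem.List.pyGetD row (c0 + (k : Int)) 0 = 1 then cs.2 + 1 else cs.2)) ([0], 0)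
    = ((List.range (n + 1)).map (fun (b : Nat) =>
          if b = 0 then 0 else PySem.List.pyGetD prev (b : Int) 0 + pvRowIn row c0 b),
        pvRowIn row c0 n) := by
  induction n with
  | zero => simp [pvRowIn]
  | succ n ih =>
    rw [List.range_succ, List.foldl_append, ih]
    have hs : (if PySem.List.pyGetD row (c0 + (n : Int)) 0 = 1
          then pvRowIn row c0 n + 1 else pvRowIn row c0 n) = pvRowIn row c0 (n + 1) := by
      rw [pvRowIn_succ, pv_ite_add_one]; rfl
    simp only [List.foldl_cons, List.foldl_nil, hs]
    rw [List.range_succ (n := n + 1), List.map_append]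
    have hc : PySem.List.pyGetD prev ((n : Int) + 1) 0 = prev.getD (n + 1) 0 := by
      rw [show ((n : Int) + 1) = (((n + 1 : Nat)) : Int) by push_cast; ring,
        PySem.List.pyGetD_natCast]
    simp [hc, List.getD]

-- full characterisation of B's summed-area table
lemma pvBuildP (cells : List (List Int)) (r0 c0 : Int) (W' : Nat) (m : Nat) :
    (List.range m).foldl (fun (st : List (List Int) × List Int) (t : Nat) =>
        (st.1 ++ [((List.range W').foldl (fun (cs : List Int × Int) (k : Nat) =>
            (cs.1 ++ [PySem.List.pyGetD st.2 ((k : Int) + 1) 0 +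
                (if PySem.List.pyGetD (PySem.List.pyGetD cells (r0 + (t : Int)) []) (c0 + (k : Int)) 0 = 1 then cs.2 + 1 else cs.2)],
              if PySem.List.pyGetD (PySem.List.pyGetD cells (r0 + (t : Int)) []) (c0 + (k : Int)) 0 = 1 then cs.2 + 1 else cs.2)) ([0], 0)).1],
          ((List.range W').foldl (fun (cs : List Int × Int) (k : Nat) =>
            (cs.1 ++ [PySem.List.pyGetD st.2 ((k : Int) + 1) 0 +
                (if PySem.List.pyGetD (PySem.List.pyGetD cells (r0 + (t : Int)) []) (c0 + (k : Int)) 0 = 1 then cs.2 + 1 else cs.2)],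
              if PySem.List.pyGetD (PySem.List.pyGetD cells (r0 + (t : Int)) []) (c0 + (k : Int)) 0 = 1 then cs.2 + 1 else cs.2)) ([0], 0)).1))
      (([List.replicate (W' + 1) 0] : List (List Int)), List.replicate (W' + 1) 0)
    = ((List.range (m + 1)).map (fun t =>
          (List.range (W' + 1)).map (fun b => pvSAT cells r0 c0 t b)),
        (List.range (W' + 1)).map (fun b => pvSAT cells r0 c0 m b)) := by
  have hrow0 : List.replicate (W' + 1) (0 : Int)
      = (List.range (W' + 1)).map (fun b => pvSAT cells r0 c0 0 b) := by
    simp [pvSAT]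
  induction m with
  | zero => simp [hrow0]
  | succ m ih =>
    rw [List.range_succ, List.foldl_append, ih]
    simp only [List.foldl_cons, List.foldl_nil, pvInnerScan]
    have hcur : ((List.range (W' + 1)).map (fun (b : Nat) =>
          if b = 0 then 0
          else PySem.List.pyGetD ((List.range (W' + 1)).map (fun (b : Nat) => pvSAT cells r0 c0 m b)) (b : Int) 0
            + pvRowIn (PySem.List.pyGetD cells (r0 + (m : Int)) []) c0 b))
        = (List.range (W' + 1)).map (fun b => pvSAT cells r0 c0 (m + 1) b) := by
      apply List.map_congr_left
      intro b hb
      rw [List.mem_range] at hb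
      by_cases hb0 : b = 0
      · subst hb0; simp [pvSAT_zero_right]
      · rw [if_neg hb0, PySem.List.pyGetD_natCast, PySem.List.getD_map_range _ _ _ _ hb,
          pvSAT_succ]
    rw [hcur]
    rw [List.range_succ (n := m + 1), List.map_append]
    simp

def pvT (cells : List (List Int)) (r c i j : Int) : Int :=
  if PySem.List.pyGetD (PySem.List.pyGetD cells (r + i) []) (c + j) 0 = 1 then 1 else 0

-- A's 9-step decrement loop is 9 minus the sum of the nine indicators
lemma pvCellA (cells : List (List Int)) (r c : Int) :
    ([(-1 : Int), 0, 1]).foldl (fun cnt i => ([(-1 : Int), 0, 1]).foldl (fun cnt j =>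
        if PySem.List.pyGetD (PySem.List.pyGetD cells (r + i) []) (c + j) 0 = 1 then cnt - 1 else cnt) cnt) 9
    = 9 - ((pvT cells r c (-1) (-1) + pvT cells r c (-1) 0 + pvT cells r c (-1) 1)
        + (pvT cells r c 0 (-1) + pvT cells r c 0 0 + pvT cells r c 0 1)
        + (pvT cells r c 1 (-1) + pvT cells r c 1 0 + pvT cells r c 1 1)) := by
  simp only [List.foldl_cons, List.foldl_nil, pv_ite_sub_one, pvT]
  ring

lemma pvT_eq_ind (cells : List (List Int)) (r c i j r' c0 : Int) (n : Nat)
    (hr : r + i = r') (hc : c + j = c0 + (n : Int)) :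
    pvT cells r c i j = pvInd (PySem.List.pyGetD cells r' []) c0 n := by
  simp [pvT, pvInd, hr, hc]

-- reading the characterised table
lemma pvPget (cells : List (List Int)) (r0 c0 : Int) (H' W' : Nat) (i b : Nat)
    (hi : i < H' + 1) (hb : b < W' + 1) :
    PySem.List.pyGetD (PySem.List.pyGetD
        ((List.range (H' + 1)).map (fun t => (List.range (W' + 1)).map (fun b => pvSAT cells r0 c0 t b)))
        ((i : Nat) : Int) []) ((b : Nat) : Int) 0
    = pvSAT cells r0 c0 i b := by
  rw [PySem.List.pyGetD_natCast, PySem.List.pyGetD_natCast,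
    PySem.List.getD_map_range _ _ _ _ hi, PySem.List.getD_map_range _ _ _ _ hb]

-- ===== VERDICT (by name: the statement is the Claim_ definition above) =====
theorem calcTargetCell_spec : Claim_equal_calcTargetCell := by
  intro bl tr cells _ _
  obtain ⟨r0, c0⟩ := bl
  obtain ⟨r1, c1⟩ := tr
  unfold Spec_calcTargetCell calcTargetCell calcTargetCell_alt
  dsimp only
  by_cases hE : r1 ≤ r0 + 1 ∨ c1 ≤ c0 + 1
  · rw [if_pos hE]
    rcases hE with h | h
    · rw [PySem.List.pyRange_one_eq_nil (a := r0 + 1) (b := r1) (by omega)]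
      simp
    · rw [PySem.List.foldl_congr_mem _ _ (fun st _ => st) _ ?_, pv_foldl_id]
      · intro acc x hx
        rw [PySem.List.pyRange_one_eq_nil (a := c0 + 1) (b := c1) (by omega)]
        rfl
  · rw [if_neg hE]
    push Not at hE
    obtain ⟨h1, h2⟩ := hE
    have hHn : r1 - r0 + 1 = (((r1 - r0 + 1).toNat : Nat) : Int) := by omega
    have hWn : c1 - c0 + 1 = (((c1 - c0 + 1).toNat : Nat) : Int) := by omega
    set H' := (r1 - r0 + 1).toNat with hH'
    set W' := (c1 - c0 + 1).toNat with hW'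
    rw [PySem.List.pyRepeat_singleton]
    have hrep : (c1 - c0 + 1 + 1).toNat = W' + 1 := by omega
    rw [hrep, hHn, hWn]
    simp only [PySem.List.pyRange_zero_nat, List.foldl_map]
    rw [pvBuildP cells r0 c0 W' H']
    refine congrArg (fun res : Int × Int × Int => (res.2.1, res.2.2)) ?_
    refine PySem.List.foldl_congr_mem _ _ _ _ ?_
    intro st r hr
    refine PySem.List.foldl_congr_mem _ _ _ _ ?_
    intro st' c hc
    rw [PySem.List.mem_pyRange_one] at hr hc
    obtain ⟨hr1, hr2⟩ := hr
    obtain ⟨hc1, hc2⟩ := hc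
    set m := (r - (r0 + 1)).toNat with hm
    set n := (c - (c0 + 1)).toNat with hn
    have hmi : ((m : Nat) : Int) = r - r0 - 1 := by omega
    have hni : ((n : Nat) : Int) = c - c0 - 1 := by omega
    have e1 : r - r0 + 2 = (((m + 3 : Nat)) : Int) := by push_cast; omega
    have e2 : r - r0 - 1 = (((m : Nat)) : Int) := by omega
    have e3 : c - c0 + 2 = (((n + 3 : Nat)) : Int) := by push_cast; omega
    have e4 : c - c0 - 1 = (((n : Nat)) : Int) := by omega
    rw [pvCellA, e1, e2, e3, e4,
      pvPget cells r0 c0 H' W' (m + 3) (n + 3) (by omega) (by omega),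
      pvPget cells r0 c0 H' W' m (n + 3) (by omega) (by omega),
      pvPget cells r0 c0 H' W' (m + 3) n (by omega) (by omega),
      pvPget cells r0 c0 H' W' m n (by omega) (by omega),
      pvWindow]
    have hT : (pvT cells r c (-1) (-1) + pvT cells r c (-1) 0 + pvT cells r c (-1) 1)
        + (pvT cells r c 0 (-1) + pvT cells r c 0 0 + pvT cells r c 0 1)
        + (pvT cells r c 1 (-1) + pvT cells r c 1 0 + pvT cells r c 1 1)
      = (pvInd (PySem.List.pyGetD cells (r0 + (m : Int)) []) c0 n
          + pvInd (PySem.List.pyGetD cells (r0 + (m : Int)) []) c0 (n + 1)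
          + pvInd (PySem.List.pyGetD cells (r0 + (m : Int)) []) c0 (n + 2))
        + (pvInd (PySem.List.pyGetD cells (r0 + ((m : Int) + 1)) []) c0 n
          + pvInd (PySem.List.pyGetD cells (r0 + ((m : Int) + 1)) []) c0 (n + 1)
          + pvInd (PySem.List.pyGetD cells (r0 + ((m : Int) + 1)) []) c0 (n + 2))
        + (pvInd (PySem.List.pyGetD cells (r0 + ((m : Int) + 2)) []) c0 n
          + pvInd (PySem.List.pyGetD cells (r0 + ((m : Int) + 2)) []) c0 (n + 1)
          + pvInd (PySem.List.pyGetD cells (r0 + ((m : Int) + 2)) []) c0 (n + 2)) := by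
      rw [pvT_eq_ind cells r c (-1) (-1) (r0 + (m : Int)) c0 n (by omega) (by omega),
        pvT_eq_ind cells r c (-1) 0 (r0 + (m : Int)) c0 (n + 1) (by omega) (by push_cast; omega),
        pvT_eq_ind cells r c (-1) 1 (r0 + (m : Int)) c0 (n + 2) (by omega) (by push_cast; omega),
        pvT_eq_ind cells r c 0 (-1) (r0 + ((m : Int) + 1)) c0 n (by omega) (by omega),
        pvT_eq_ind cells r c 0 0 (r0 + ((m : Int) + 1)) c0 (n + 1) (by omega) (by push_cast; omega),
        pvT_eq_ind cells r c 0 1 (r0 + ((m : Int) + 1)) c0 (n + 2) (by omega) (by push_cast; omega),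
        pvT_eq_ind cells r c 1 (-1) (r0 + ((m : Int) + 2)) c0 n (by omega) (by omega),
        pvT_eq_ind cells r c 1 0 (r0 + ((m : Int) + 2)) c0 (n + 1) (by omega) (by push_cast; omega),
        pvT_eq_ind cells r c 1 1 (r0 + ((m : Int) + 2)) c0 (n + 2) (by omega) (by push_cast; omega)]
    rw [hT]
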